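-- pv_equiv track=rewrite | github.com/pirrofra/wifiSniffer | src/dataAnalysis/relationshipGraph/relationshipGraph.py | createGraph
-- ===== SOURCE A (Python) =====
-- def createGraph(data,workplaces):
--     graph={}
--     for element in data:
--         if(workplaces.get(element["mac"])!=None):
--             workplace=workplaces[element["mac"]]
--             if(element["roomName"]!=workplace):
--                 if(graph.get(workplace)==None):
--                     graph[workplace]={}
--                 if(graph[workplace].get(element["roomName"])==None):
--                     graph[workplace][element["roomName"]]=0
--                 graph[workplace][element["roomName"]]=graph[workplace][element["roomName"]]+1
--     return graph
-- ===== SOURCE B (Python) =====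
-- def createGraph(data, workplaces):
--     # stage 1: extract the list of (workplace, roomName) transition pairs
--     transitions = [(workplaces[e["mac"]], e["roomName"])
--                    for e in data
--                    if e["mac"] in workplaces and e["roomName"] != workplaces[e["mac"]]]
--     # stage 2: for each workplace (first-occurrence order), count each room's
--     # occurrences by scanning the transition list (list.count), no mutation
--     graph = {}
--     for w in dict.fromkeys(w for w, _ in transitions):
--         rooms = [r for w2, r in transitions if w2 == w]
--         graph[w] = {r: rooms.count(r) for r in dict.fromkeys(rooms)}
--     return graph
-- ===== Notes on version B (the rewrite author's own statement) =====
-- stated objective: alternative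
-- what changed: A makes one mutating pass that increments counters inside an incrementally-built nested dict; B is three declarative stages: a comprehension extracting the flat list of (workplace, roomName) transition pairs, an ordered dedup of the workplaces, and per workplace an inner dict computed by counting each room's occurrences with list.count over the extracted list (no mutation, no incremental counters).
import Mathlib
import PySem

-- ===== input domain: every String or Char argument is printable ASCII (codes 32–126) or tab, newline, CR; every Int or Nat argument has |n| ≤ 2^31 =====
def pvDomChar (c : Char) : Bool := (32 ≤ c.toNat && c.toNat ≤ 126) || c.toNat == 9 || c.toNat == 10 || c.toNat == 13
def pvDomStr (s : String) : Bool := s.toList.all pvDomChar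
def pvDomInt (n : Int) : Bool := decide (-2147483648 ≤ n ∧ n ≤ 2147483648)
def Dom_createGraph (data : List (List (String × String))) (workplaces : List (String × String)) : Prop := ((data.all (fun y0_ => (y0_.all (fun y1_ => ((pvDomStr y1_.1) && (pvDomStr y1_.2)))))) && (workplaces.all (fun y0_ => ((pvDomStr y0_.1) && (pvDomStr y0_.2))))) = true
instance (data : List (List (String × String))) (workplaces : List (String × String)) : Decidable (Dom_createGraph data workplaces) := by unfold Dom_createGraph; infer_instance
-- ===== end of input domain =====

-- B replaces A's single mutating pass (incrementally updating a nested dict) by three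
-- declarative stages: extract the transition-pair list, dedup the workplaces, and compute
-- each count by scanning the list with list.count (alternative decomposition, not faster).

-- ===== PORT A =====
def createGraph (data : List (List (String × String))) (workplaces : List (String × String)) : List (String × List (String × Int)) :=
  let wd := PySem.Dict.ofList workplaces
  let graph : PySem.Dict String (PySem.Dict String Int) :=
    data.foldl (fun graph element =>
      let ed := PySem.Dict.ofList element
      match ed.get? "mac" with
      | none => graph            -- KeyError: excluded by Pre_
      | some mac =>
        match wd.get? mac with   -- workplaces.get(element["mac"]) != None
        | none => graph
        | some workplace =>
          match ed.get? "roomName" with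
          | none => graph        -- KeyError: excluded by Pre_
          | some room =>
            if room ≠ workplace then
              let graph := if (graph.get? workplace).isNone then graph.insert workplace PySem.Dict.empty else graph
              let inner := graph.getD workplace PySem.Dict.empty
              let inner := if (inner.get? room).isNone then inner.insert room 0 else inner
              graph.insert workplace (inner.insert room (inner.getD room 0 + 1))
            else graph) PySem.Dict.empty
  graph.items.map (fun p => (p.1, p.2.items))

-- ===== PORT B =====
def createGraph_alt (data : List (List (String × String))) (workplaces : List (String × String)) : List (String × List (String × Int)) :=
  let wd := PySem.Dict.ofList workplaces
  -- stage 1: the list comprehension of (workplace, roomName) transition pairs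
  let transitions : List (String × String) :=
    data.foldl (fun ts e =>
      let ed := PySem.Dict.ofList e
      match ed.get? "mac" with
      | none => ts               -- KeyError: excluded by Pre_
      | some mac =>
        if wd.contains mac then
          match ed.get? "roomName" with
          | none => ts           -- KeyError: excluded by Pre_
          | some room =>
            if room ≠ wd.getD mac "" then ts ++ [(wd.getD mac "", room)] else ts
        else ts) []
  -- stage 2: per workplace (dict.fromkeys order = PySem.List.dedup), count rooms by scanning;
  -- the Python dict comprehensions build dicts over distinct fresh keys, so their association
  -- lists are exactly these maps over the deduplicated key lists
  (PySem.List.dedup (transitions.map (fun p => p.1))).map (fun w =>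
    let rooms := (transitions.filter (fun p => p.1 == w)).map (fun p => p.2)
    (w, (PySem.List.dedup rooms).map (fun r => (r, (rooms.count r : Int)))))

-- ===== PRECONDITION & SPEC =====
-- Pre_ excludes exactly the inputs on which Python A raises KeyError: an element without a
-- "mac" key, or an element whose mac is a workplaces key but which has no "roomName" key.
def Pre_createGraph (data : List (List (String × String))) (workplaces : List (String × String)) : Prop :=
  ∀ e ∈ data, ((PySem.Dict.ofList e).contains "mac" = true ∧
    ((PySem.Dict.ofList workplaces).contains ((PySem.Dict.ofList e).getD "mac" "") = true →
      (PySem.Dict.ofList e).contains "roomName" = true))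
instance (data : List (List (String × String))) (workplaces : List (String × String)) : Decidable (Pre_createGraph data workplaces) := by unfold Pre_createGraph; infer_instance
def pvWitness_createGraph : (List (List (String × String))) × (List (String × String)) :=
  ([[("mac", "m1"), ("roomName", "r1")], [("mac", "m2"), ("roomName", "r1")]], [("m1", "w1")])

def Spec_createGraph (data : List (List (String × String))) (workplaces : List (String × String)) (out : List (String × List (String × Int))) : Prop := out = createGraph_alt data workplaces
instance (data : List (List (String × String))) (workplaces : List (String × String)) (out : List (String × List (String × Int))) : Decidable (Spec_createGraph data workplaces out) := by unfold Spec_createGraph; infer_instance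

-- ===== CLAIM (what is proved, stated in full; the proofs are below) =====
def Claim_equal_createGraph : Prop := ∀ (data : List (List (String × String))) (workplaces : List (String × String)), Dom_createGraph data workplaces → Pre_createGraph data workplaces → Spec_createGraph data workplaces (createGraph data workplaces)

-- ===== LEMMAS AND PROOFS =====

-- the common guard: which (workplace, room) transition (if any) an element contributes
def pvEx (workplaces : List (String × String)) (element : List (String × String)) : Option (String × String) :=
  match (PySem.Dict.ofList element).get? "mac" with
  | none => none
  | some mac =>
    match (PySem.Dict.ofList workplaces).get? mac with
    | none => none
    | some workplace =>
      match (PySem.Dict.ofList element).get? "roomName" with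
      | none => none
      | some room => if room ≠ workplace then some (workplace, room) else none

-- A's nested update on a transition
def pvCoreA (graph : PySem.Dict String (PySem.Dict String Int)) (wp room : String) : PySem.Dict String (PySem.Dict String Int) :=
  let graph := if (graph.get? wp).isNone then graph.insert wp PySem.Dict.empty else graph
  let inner := graph.getD wp PySem.Dict.empty
  let inner := if (inner.get? room).isNone then inner.insert room 0 else inner
  graph.insert wp (inner.insert room (inner.getD room 0 + 1))

-- A's accumulated graph over a transition list
def pvAG (T : List (String × String)) : PySem.Dict String (PySem.Dict String Int) :=
  T.foldl (fun g p => pvCoreA g p.1 p.2) PySem.Dict.empty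

-- B's room list and inner association list for one workplace
def pvRms (T : List (String × String)) (w : String) : List String :=
  (T.filter (fun p => p.1 == w)).map (fun p => p.2)

def pvInner (T : List (String × String)) (w : String) : List (String × Int) :=
  (PySem.List.dedup (pvRms T w)).map (fun r => (r, ((pvRms T w).count r : Int)))

theorem pv_foldl_factor {α β G : Type} (ex : α → Option β) (f : G → β → G) :
    ∀ (l : List α) (g : G),
      l.foldl (fun g e => match ex e with | none => g | some p => f g p) g = (l.filterMap ex).foldl f g := by
  intro l
  induction l with
  | nil => intro g; simp
  | cons h t ih =>
    intro g
    simp only [List.foldl_cons, List.filterMap_cons]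
    cases hex : ex h with
    | none => simpa using ih g
    | some p => simpa using ih (f g p)

theorem pvA_factor (data : List (List (String × String))) (workplaces : List (String × String)) :
    createGraph data workplaces = (pvAG (data.filterMap (pvEx workplaces))).items.map (fun p => (p.1, p.2.items)) := by
  simp only [createGraph, pvAG]
  rw [← pv_foldl_factor]
  congr 3
  funext g e
  unfold pvEx pvCoreA
  rcases h1 : (PySem.Dict.ofList e).get? "mac" with _ | mac <;> simp only []
  rcases h2 : (PySem.Dict.ofList workplaces).get? mac with _ | wp <;> simp only []
  rcases h3 : (PySem.Dict.ofList e).get? "roomName" with _ | room <;> simp only []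
  by_cases hrw : room ≠ wp <;> simp [hrw]

theorem pv_foldl_toList {α β : Type} (ex : α → Option β) (l : List α) (acc : List β) :
    l.foldl (fun ts e => ts ++ (ex e).toList) acc = acc ++ l.filterMap ex := by
  induction l generalizing acc with
  | nil => simp
  | cons h t ih =>
    simp only [List.foldl_cons, List.filterMap_cons]
    cases hex : ex h <;> simp [ih]

theorem pvB_factor (data : List (List (String × String))) (workplaces : List (String × String)) :
    createGraph_alt data workplaces =
      (PySem.List.dedup ((data.filterMap (pvEx workplaces)).map (fun p => p.1))).map
        (fun w => (w, pvInner (data.filterMap (pvEx workplaces)) w)) := by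
  simp only [createGraph_alt]
  have hcongr : (fun (ts : List (String × String)) e =>
      let ed := PySem.Dict.ofList e
      match ed.get? "mac" with
      | none => ts
      | some mac =>
        if (PySem.Dict.ofList workplaces).contains mac then
          match ed.get? "roomName" with
          | none => ts
          | some room =>
            if room ≠ (PySem.Dict.ofList workplaces).getD mac "" then ts ++ [((PySem.Dict.ofList workplaces).getD mac "", room)] else ts
        else ts) = (fun ts e => ts ++ (pvEx workplaces e).toList) := by
    funext ts e
    unfold pvEx
    rcases h1 : (PySem.Dict.ofList e).get? "mac" with _ | mac
    · simp [h1]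
    simp only [h1]
    have hc := PySem.Dict.contains_eq_isSome_get? (PySem.Dict.ofList workplaces) mac
    rcases h2 : (PySem.Dict.ofList workplaces).get? mac with _ | wp <;> rw [h2] at hc <;>
      simp only [hc, Option.isSome_none, Option.isSome_some, Bool.false_eq_true, if_true, if_false]
    · simp
    have hg : (PySem.Dict.ofList workplaces).getD mac "" = wp := by simp [PySem.Dict.getD_eq_get?_getD, h2]
    rw [hg]
    rcases h3 : (PySem.Dict.ofList e).get? "roomName" with _ | room
    · simp
    · by_cases hrw : room ≠ wp <;> simp [hrw]
  rw [hcongr, pv_foldl_toList, List.nil_append]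
  rfl

-- ordered dedup of an appended element
theorem pv_dedup_append {α : Type} [BEq α] [LawfulBEq α] (xs : List α) (a : α) :
    PySem.List.dedup (xs ++ [a]) = if a ∈ xs then PySem.List.dedup xs else PySem.List.dedup xs ++ [a] := by
  have h : (PySem.Set.ofList xs).contains a = decide (a ∈ xs) := by
    simp [PySem.Set.contains, PySem.Set.mem_ofList]
  simp only [PySem.List.dedup_eq_ofList, PySem.Set.ofList_eq_foldl, List.foldl_append, List.foldl_cons, List.foldl_nil]
  rw [PySem.Set.add, ← PySem.Set.ofList_eq_foldl, h]
  by_cases hm : a ∈ xs <;> simp [hm]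

theorem pvCoreA_nodup (g : PySem.Dict String (PySem.Dict String Int)) (a b : String)
    (h : g.keys.Nodup) : (pvCoreA g a b).keys.Nodup := by
  unfold pvCoreA
  by_cases hg : (g.get? a).isNone = true <;> simp only [hg, if_true, if_false, Bool.false_eq_true] <;>
    [exact PySem.Dict.nodup_keys_insert _ _ _ (PySem.Dict.nodup_keys_insert _ _ _ h);
     exact PySem.Dict.nodup_keys_insert _ _ _ h]

theorem pvAG_nodup (T : List (String × String)) : (pvAG T).keys.Nodup := by
  unfold pvAG
  have h : ∀ (T : List (String × String)) (g : PySem.Dict String (PySem.Dict String Int)),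
      g.keys.Nodup → (T.foldl (fun g p => pvCoreA g p.1 p.2) g).keys.Nodup := by
    intro T
    induction T with
    | nil => intro g hg; exact hg
    | cons p t ih => intro g hg; exact ih _ (pvCoreA_nodup g p.1 p.2 hg)
  exact h T PySem.Dict.empty (by simp)

theorem pvRms_of_not_mem (T : List (String × String)) (w : String) (h : w ∉ T.map (fun p => p.1)) :
    pvRms T w = [] := by
  unfold pvRms
  have : T.filter (fun p => p.1 == w) = [] := by
    rw [List.filter_eq_nil_iff]
    intro p hp
    simp only [beq_iff_eq]
    intro he
    exact h (he ▸ List.mem_map_of_mem hp)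
  rw [this]; rfl

-- the main invariant: A's accumulated dict has B's keys and B's per-key inner lists
theorem pv_main (T : List (String × String)) :
    (pvAG T).keys = PySem.List.dedup (T.map (fun p => p.1)) ∧
      ∀ w, ((pvAG T).getD w PySem.Dict.empty).items = pvInner T w := by
  induction T using List.reverseRecOn with
  | nil =>
    constructor
    · rfl
    · intro w
      rfl
  | append_singleton T k ih =>
    obtain ⟨h1, h2⟩ := ih
    rcases k with ⟨a, b⟩
    have hAG : pvAG (T ++ [(a, b)]) = pvCoreA (pvAG T) a b := by
      simp [pvAG, List.foldl_append]
    set G := pvAG T with hGdef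
    have hmapfst : (T ++ [(a, b)]).map (fun p => p.1) = T.map (fun p => p.1) ++ [a] := by simp
    have hRms : ∀ w, pvRms (T ++ [(a, b)]) w = pvRms T w ++ (if a = w then [b] else []) := by
      intro w
      unfold pvRms
      rw [List.filter_append]
      by_cases hw : a = w <;> simp [hw]
    rcases hga : G.get? a with _ | inner
    · -- a is a fresh workplace
      have hcont : G.contains a = false := by
        rw [PySem.Dict.contains_eq_isSome_get?, hga]; rfl
      have hnm : a ∉ T.map (fun p => p.1) := by
        rw [PySem.Dict.get?_eq_none_iff_not_mem_keys, h1, PySem.List.mem_dedup] at hga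
        exact hga
      have hcore : pvCoreA G a b = G.insert a (PySem.Dict.empty.insert b (0 + 1)) := by
        unfold pvCoreA
        simp only [hga, Option.isNone_none, if_true]
        rw [PySem.Dict.getD_insert_self]
        have he : (PySem.Dict.empty : PySem.Dict String Int).get? b = none := PySem.Dict.get?_empty _
        simp only [he, Option.isNone_none, if_true]
        rw [PySem.Dict.getD_insert_self, PySem.Dict.insert_insert_self, PySem.Dict.insert_insert_self]
      constructor
      · rw [hAG, hcore, PySem.Dict.keys_insert_of_not_contains _ _ hcont, h1, hmapfst,
            pv_dedup_append, if_neg hnm]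
      · intro w
        rw [hAG, hcore]
        by_cases hw : w = a
        · subst hw
          rw [PySem.Dict.getD_insert_self,
              PySem.Dict.items_insert_of_not_contains _ _ (by simp [PySem.Dict.contains_empty])]
          have hR : pvRms (T ++ [(w, b)]) w = [b] := by
            rw [hRms w, pvRms_of_not_mem T w hnm, if_pos rfl, List.nil_append]
          unfold pvInner
          rw [hR]
          have hd : PySem.List.dedup [b] = [b] := by
            have := pv_dedup_append ([] : List String) b
            simpa using this
          rw [hd]
          have hei : (PySem.Dict.empty : PySem.Dict String Int).items = [] := rfl
          simp [hei]
        · rw [PySem.Dict.getD_insert_of_ne _ _ _ hw]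
          unfold pvInner
          rw [hRms w, if_neg (fun he => hw (he.symm)), List.append_nil]
          exact h2 w
    · -- a already has transitions
      have hcont : G.contains a = true := by
        rw [PySem.Dict.contains_eq_isSome_get?, hga]; rfl
      have hmm : a ∈ T.map (fun p => p.1) := by
        have : a ∈ G.keys := (PySem.Dict.contains_iff_mem_keys G a).mp hcont
        rw [h1, PySem.List.mem_dedup] at this
        exact this
      have hGd : G.getD a PySem.Dict.empty = inner := by
        simp [PySem.Dict.getD_eq_get?_getD, hga]
      have hIH : inner.items = (PySem.List.dedup (pvRms T a)).map (fun r => (r, ((pvRms T a).count r : Int))) := by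
        rw [← hGd, h2 a]; rfl
      have hkeys : inner.keys = PySem.List.dedup (pvRms T a) := by
        show inner.items.map (fun p => p.1) = _
        rw [hIH, List.map_map]
        simp [Function.comp_def]
      have hndi : inner.keys.Nodup := by
        rw [hkeys]; exact PySem.List.nodup_dedup _
      constructor
      · rw [hAG]
        unfold pvCoreA
        simp only [hga, Option.isNone_some, Bool.false_eq_true, if_false]
        rw [PySem.Dict.keys_insert_of_contains _ _ hcont, h1, hmapfst, pv_dedup_append, if_pos hmm]
      · intro w
        by_cases hw : w = a
        · subst hw
          have hRa : pvRms (T ++ [(w, b)]) w = pvRms T w ++ [b] := by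
            rw [hRms w, if_pos rfl]
          set R := pvRms T w with hRdef
          rw [hAG]
          unfold pvCoreA
          simp only [hga, Option.isNone_some, Bool.false_eq_true, if_false]
          rw [PySem.Dict.getD_insert_self, hGd]
          rcases hb : inner.get? b with _ | v
          · -- first transition of w into room b
            have hbc : inner.contains b = false := by
              rw [PySem.Dict.contains_eq_isSome_get?, hb]; rfl
            have hbR : b ∉ R := by
              rw [PySem.Dict.get?_eq_none_iff_not_mem_keys, hkeys, PySem.List.mem_dedup] at hb
              exact hb
            simp only [Option.isNone_none, if_true]
            rw [PySem.Dict.insert_insert_self, PySem.Dict.getD_insert_self,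
                PySem.Dict.items_insert_of_not_contains _ _ hbc, hIH]
            unfold pvInner
            rw [hRa, pv_dedup_append, if_neg hbR, List.map_append]
            congr 1
            · rw [List.map_eq_map_iff]
              intro r hr
              have hrR : r ∈ R := (PySem.List.mem_dedup _ _).mp hr
              have hrb : b ≠ r := fun he => hbR (he ▸ hrR)
              simp [List.count_append, hrb]
            · have : R.count b = 0 := by
                rw [List.count_eq_zero]; exact hbR
              simp [List.count_append, this]
          · -- room b already counted for w
            have hbc : inner.contains b = true := by
              rw [PySem.Dict.contains_eq_isSome_get?, hb]; rfl
            have hbdd : b ∈ PySem.List.dedup R := by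
              rw [← hkeys]; exact (PySem.Dict.contains_iff_mem_keys inner b).mp hbc
            have hbR : b ∈ R := (PySem.List.mem_dedup _ _).mp hbdd
            have hv : v = (R.count b : Int) := by
              have hmemit : (b, (R.count b : Int)) ∈ inner.items := by
                rw [hIH]
                exact List.mem_map_of_mem hbdd
              have := PySem.Dict.get?_of_mem_items inner hmemit hndi
              rw [hb] at this
              exact Option.some_inj.mp this
            simp only [Option.isNone_some, Bool.false_eq_true, if_false]
            have hgdb : inner.getD b 0 = v := by simp [PySem.Dict.getD_eq_get?_getD, hb]
            rw [hgdb, PySem.Dict.items_insert_of_contains _ _ hbc, hIH, List.map_map]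
            unfold pvInner
            rw [hRa, pv_dedup_append, if_pos hbR, List.map_eq_map_iff]
            intro r hr
            simp only [Function.comp]
            by_cases hrb : r = b
            · subst hrb
              simp [List.count_append, hv]
            · have hbr : b ≠ r := fun he => hrb he.symm
              simp [List.count_append, hrb, hbr]
        · -- other workplaces are untouched
          rw [hAG]
          unfold pvCoreA
          simp only [hga, Option.isNone_some, Bool.false_eq_true, if_false]
          rw [PySem.Dict.getD_insert_of_ne _ _ _ hw]
          unfold pvInner
          rw [hRms w, if_neg (fun he => hw he.symm), List.append_nil]
          exact h2 w

theorem pv_assemble (T : List (String × String)) :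
    (pvAG T).items.map (fun p => (p.1, p.2.items)) =
      (PySem.List.dedup (T.map (fun p => p.1))).map (fun w => (w, pvInner T w)) := by
  obtain ⟨h1, h2⟩ := pv_main T
  rw [PySem.Dict.items_eq_map_keys (pvAG T) (pvAG_nodup T) PySem.Dict.empty, List.map_map, h1,
      List.map_eq_map_iff]
  intro w _
  simp only [Function.comp]
  rw [h2 w]

-- ===== VERDICT (by name: the statement is the Claim_ definition above) =====
theorem createGraph_spec : Claim_equal_createGraph := by
  intro data workplaces _ _
  unfold Spec_createGraph
  rw [pvA_factor, pvB_factor, pv_assemble]
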